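-- pv_equiv track=rewrite | github.com/ScoobySatiacum/AoC2023 | day6/day6.py | calculate_races
-- ===== SOURCE A (Python) =====
-- def calculate_races(parsed_inputs):
--     race_times = []
--
--     for key in parsed_inputs.keys():
--         race_runs = []
--
--         distnace_to_beat = parsed_inputs[key]
--
--         for i in range(key):
--             mm_per_s = i
--             time = key - i
--
--             traveled_distance = mm_per_s * time
--             if traveled_distance > distnace_to_beat:
--                 race_runs.append(traveled_distance)
--
--         race_times.append(race_runs)
--
--     return race_times
-- ===== SOURCE B (Python) =====
-- def _winning(key, record):
--     mid = key // 2
--     if key <= 0 or mid * (key - mid) <= record: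
--         return []
--     lo, hi = 0, mid
--     while lo < hi:
--         m = (lo + hi) // 2
--         if m * (key - m) > record:
--             hi = m
--         else:
--             lo = m + 1
--     last = key - lo if lo > 0 else key - 1
--     return [i * (key - i) for i in range(lo, last + 1)]
--
--
-- def calculate_races(parsed_inputs):
--     return [_winning(key, record) for key, record in parsed_inputs.items()]
-- ===== Notes on version B (the rewrite author's own statement) =====
-- stated objective: alternative
-- what changed: B replaces A's scan-and-filter over all of range(key) with a binary search for the least winning hold time (using that i*(key-i) is unimodal and symmetric about key/2), then emits the winning distances as one contiguous comprehension over exactly the winners.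
import Mathlib
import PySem

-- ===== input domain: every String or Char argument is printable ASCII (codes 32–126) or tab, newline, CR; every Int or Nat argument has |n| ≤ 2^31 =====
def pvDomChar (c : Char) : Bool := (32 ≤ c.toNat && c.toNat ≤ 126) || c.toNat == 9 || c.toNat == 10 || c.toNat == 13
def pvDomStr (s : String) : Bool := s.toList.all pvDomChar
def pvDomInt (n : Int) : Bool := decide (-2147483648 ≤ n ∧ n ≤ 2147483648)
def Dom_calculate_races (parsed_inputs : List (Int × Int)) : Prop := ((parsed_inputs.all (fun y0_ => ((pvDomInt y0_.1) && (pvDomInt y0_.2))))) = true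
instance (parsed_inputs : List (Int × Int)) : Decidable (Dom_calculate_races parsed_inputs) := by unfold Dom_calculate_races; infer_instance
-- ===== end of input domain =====

-- B replaces A's scan-and-filter of range(key) by a binary search for the least
-- winning hold time plus one contiguous comprehension over exactly the winners.

-- ===== PORT A =====
-- inner loop: for i in range(key): … if traveled_distance > distnace_to_beat: race_runs.append(…)
def pvRunsA (key dtb : Int) : List Int :=
  (PySem.List.pyRange 0 key 1).foldl
    (fun race_runs i => if i * (key - i) > dtb then race_runs ++ [i * (key - i)] else race_runs) []

def calculate_races (parsed_inputs : List (Int × Int)) : List (List Int) :=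
  (PySem.Dict.mk parsed_inputs).keys.foldl
    (fun race_times key =>
      race_times ++ [pvRunsA key ((PySem.Dict.mk parsed_inputs).getD key 0)]) []

-- ===== PORT B =====
-- while lo < hi: m = (lo+hi)//2; if m*(key-m) > record: hi = m else: lo = m+1
def pvBsearch (key record lo hi : Int) : Int :=
  if h : lo < hi then
    let m := PySem.Int.floordiv (lo + hi) 2
    if m * (key - m) > record then pvBsearch key record lo m
    else pvBsearch key record (m + 1) hi
  else lo
termination_by (hi - lo).toNat
decreasing_by
  · have h2 : PySem.Int.floordiv (lo + hi) 2 < hi := by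
      rw [PySem.Int.floordiv_lt_iff_lt_mul (by omega)]; omega
    have h1 := (PySem.Int.floordiv_two_mid_bounds (le_of_lt h)).1
    omega
  · have h2 : PySem.Int.floordiv (lo + hi) 2 < hi := by
      rw [PySem.Int.floordiv_lt_iff_lt_mul (by omega)]; omega
    have h1 := (PySem.Int.floordiv_two_mid_bounds (le_of_lt h)).1
    omega

def pvWinningB (key record : Int) : List Int :=
  let mid := PySem.Int.floordiv key 2
  if key ≤ 0 ∨ mid * (key - mid) ≤ record then []
  else
    let lo := pvBsearch key record 0 mid
    let last := if lo > 0 then key - lo else key - 1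
    (PySem.List.pyRange lo (last + 1) 1).map (fun i => i * (key - i))

def calculate_races_alt (parsed_inputs : List (Int × Int)) : List (List Int) :=
  parsed_inputs.map (fun p => pvWinningB p.1 p.2)

-- ===== PRECONDITION & SPEC =====
-- Pre_ requires the association-list keys to be distinct: a Python dict (A's actual
-- argument type) always has distinct keys, so duplicate-key lists represent no input
-- Python A can be called on; nothing is excluded on which A returns.
def Pre_calculate_races (parsed_inputs : List (Int × Int)) : Prop :=
  (parsed_inputs.map Prod.fst).Nodup

instance (parsed_inputs : List (Int × Int)) : Decidable (Pre_calculate_races parsed_inputs) := by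
  unfold Pre_calculate_races; infer_instance

def pvWitness_calculate_races : (List (Int × Int)) := [(7, 9), (6, 5), (4, -1), (0, 3)]

def Spec_calculate_races (parsed_inputs : List (Int × Int)) (out : List (List Int)) : Prop := out = calculate_races_alt parsed_inputs
instance (parsed_inputs : List (Int × Int)) (out : List (List Int)) : Decidable (Spec_calculate_races parsed_inputs out) := by unfold Spec_calculate_races; infer_instance

-- ===== CLAIM (what is proved, stated in full; the proofs are below) =====
def Claim_equal_calculate_races : Prop := ∀ (parsed_inputs : List (Int × Int)), Dom_calculate_races parsed_inputs → Pre_calculate_races parsed_inputs → Spec_calculate_races parsed_inputs (calculate_races parsed_inputs)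

-- ===== LEMMAS AND PROOFS =====

-- the distance function is bounded by its value at mid = key//2
lemma pv_f_le_mid (key i : Int) (hk : 0 < key) (h0 : 0 ≤ i) (hik : i < key) :
    i * (key - i) ≤ PySem.Int.floordiv key 2 * (key - PySem.Int.floordiv key 2) := by
  set m := PySem.Int.floordiv key 2 with hm
  have hb : 2 * m ≤ key ∧ key ≤ 2 * m + 1 := by
    have := PySem.Int.floordiv_eq_iff_of_pos (a := key) (b := 2) (q := m) (by omega)
    have := this.mp hm.symm
    omega
  by_cases hle : i ≤ m
  · nlinarith [mul_nonneg (by omega : (0:Int) ≤ m - i) (by omega : (0:Int) ≤ key - m - i)]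
  · nlinarith [mul_nonneg (by omega : (0:Int) ≤ i - m) (by omega : (0:Int) ≤ i - (key - m))]


-- binary-search correctness: returns the least winning i, given invariants
lemma pvBsearch_spec (key record : Int) :
    ∀ (n : Nat) (lo hi : Int), (hi - lo).toNat ≤ n → 0 ≤ lo → lo ≤ hi → 2 * hi ≤ key →
    (∀ j : Int, 0 ≤ j → j < lo → j * (key - j) ≤ record) →
    hi * (key - hi) > record →
    lo ≤ pvBsearch key record lo hi ∧ pvBsearch key record lo hi ≤ hi ∧
    pvBsearch key record lo hi * (key - pvBsearch key record lo hi) > record ∧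
    (∀ j : Int, 0 ≤ j → j < pvBsearch key record lo hi → j * (key - j) ≤ record) := by
  intro n
  induction n with
  | zero =>
    intro lo hi hn h0 hlh _ hinv hwin
    have heq : lo = hi := by omega
    rw [pvBsearch, dif_neg (by omega)]
    subst heq
    exact ⟨le_refl _, le_refl _, hwin, hinv⟩
  | succ n ih =>
    intro lo hi hn h0 hlh hhk hinv hwin
    by_cases h : lo < hi
    · have hm1 := (PySem.Int.floordiv_two_mid_bounds (le_of_lt h)).1
      have hm2 : PySem.Int.floordiv (lo + hi) 2 < hi := by
        rw [PySem.Int.floordiv_lt_iff_lt_mul (by omega)]; omega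
      rw [pvBsearch, dif_pos h]
      set m := PySem.Int.floordiv (lo + hi) 2 with hmdef
      by_cases hc : m * (key - m) > record
      · rw [if_pos hc]
        obtain ⟨a1, a2, a3, a4⟩ := ih lo m (by omega) h0 hm1 (by omega) hinv hc
        exact ⟨a1, by omega, a3, a4⟩
      · rw [if_neg hc]
        have hinv' : ∀ j : Int, 0 ≤ j → j < m + 1 → j * (key - j) ≤ record := by
          intro j hj0 hjm
          by_cases hjlo : j < lo
          · exact hinv j hj0 hjlo
          · push_neg at hc hjlo
            nlinarith [mul_nonneg (by omega : (0:Int) ≤ m - j) (by omega : (0:Int) ≤ key - j - m)]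
        obtain ⟨a1, a2, a3, a4⟩ := ih (m + 1) hi (by omega) (by omega) (by omega) hhk hinv' hwin
        exact ⟨by omega, a2, a3, a4⟩
    · rw [pvBsearch, dif_neg h]
      have heq : lo = hi := by omega
      subst heq
      exact ⟨le_refl _, le_refl _, hwin, hinv⟩

-- winners form exactly the interval [lo, last]
lemma pv_interval (key record lo last i : Int) (hk : 0 < key)
    (hlo0 : 0 ≤ lo) (hlom : 2 * lo ≤ key)
    (hwin : lo * (key - lo) > record)
    (hmin : ∀ j : Int, 0 ≤ j → j < lo → j * (key - j) ≤ record)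
    (hlast : last = if lo > 0 then key - lo else key - 1)
    (h0 : 0 ≤ i) (hik : i < key) :
    (i * (key - i) > record) ↔ (lo ≤ i ∧ i ≤ last) := by
  constructor
  · intro hw
    have hilo : lo ≤ i := by
      by_contra hcon
      push_neg at hcon
      exact absurd hw (not_lt.mpr (hmin i h0 hcon))
    refine ⟨hilo, ?_⟩
    by_cases hl0 : lo > 0
    · rw [hlast, if_pos hl0]
      by_contra hcon
      push_neg at hcon
      have hj : key - i < lo := by omega
      have hj0 : (0:Int) ≤ key - i := by omega
      have := hmin (key - i) hj0 hj
      nlinarith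
    · rw [hlast, if_neg hl0]; omega
  · intro ⟨h1, h2⟩
    have hile : i + lo ≤ key := by
      by_cases hl0 : lo > 0
      · rw [hlast, if_pos hl0] at h2; omega
      · omega
    nlinarith [mul_nonneg (by omega : (0:Int) ≤ i - lo) (by omega : (0:Int) ≤ key - i - lo)]

-- core: A's inner loop equals B's race computation
lemma pv_inner (key record : Int) : pvRunsA key record = pvWinningB key record := by
  unfold pvRunsA pvWinningB
  rw [PySem.List.foldl_append_ite (p := fun i => i * (key - i) > record)
        (f := fun i => i * (key - i))]
  rw [List.nil_append]
  by_cases hk : key ≤ 0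
  · rw [PySem.List.pyRange_one_eq_nil hk, if_pos (Or.inl hk)]
    simp
  · push_neg at hk
    set mid := PySem.Int.floordiv key 2 with hmid
    have hmb : 2 * mid ≤ key ∧ key ≤ 2 * mid + 1 := by
      have := (PySem.Int.floordiv_eq_iff_of_pos (a := key) (b := 2) (q := mid) (by omega)).mp hmid.symm
      omega
    by_cases hm : mid * (key - mid) ≤ record
    · rw [if_pos (Or.inr hm)]
      rw [List.filter_eq_nil_iff.mpr, List.map_nil]
      intro i hi
      rw [PySem.List.mem_pyRange_one] at hi
      simp only [decide_eq_true_eq, not_lt]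
      exact le_trans (pv_f_le_mid key i hk hi.1 hi.2) hm
    · push_neg at hm
      rw [if_neg (by push_neg; exact ⟨by omega, hm⟩)]
      have hspec := pvBsearch_spec key record (mid - 0).toNat 0 mid (le_refl _)
        (le_refl _) (by omega) hmb.1 (by intro j hj0 hj; omega) hm
      set lo := pvBsearch key record 0 mid with hlo
      obtain ⟨hlo0, hlomid, hwin, hminim⟩ := hspec
      set last := if lo > 0 then key - lo else key - 1 with hlast
      have hlast_lt : last + 1 ≤ key := by rw [hlast]; split <;> omega
      have hlo_le : lo ≤ last + 1 := by rw [hlast]; split <;> omega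
      rw [PySem.List.pyRange_one_append 0 lo key hlo0 (by omega),
          PySem.List.pyRange_one_append lo (last + 1) key hlo_le hlast_lt,
          List.filter_append, List.filter_append]
      have hf1 : (PySem.List.pyRange 0 lo 1).filter (fun i => decide (i * (key - i) > record)) = [] := by
        rw [List.filter_eq_nil_iff]
        intro i hi
        rw [PySem.List.mem_pyRange_one] at hi
        simp only [decide_eq_true_eq, not_lt]
        exact hminim i hi.1 hi.2
      have hf3 : (PySem.List.pyRange (last + 1) key 1).filter (fun i => decide (i * (key - i) > record)) = [] := by
        rw [List.filter_eq_nil_iff]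
        intro i hi
        rw [PySem.List.mem_pyRange_one] at hi
        simp only [decide_eq_true_eq, not_lt]
        by_contra hcon
        push_neg at hcon
        have := (pv_interval key record lo last i hk hlo0 (by omega) hwin hminim hlast
          (by omega) hi.2).mp hcon
        omega
      have hf2 : (PySem.List.pyRange lo (last + 1) 1).filter (fun i => decide (i * (key - i) > record)) = PySem.List.pyRange lo (last + 1) 1 := by
        rw [List.filter_eq_self]
        intro i hi
        rw [PySem.List.mem_pyRange_one] at hi
        simp only [decide_eq_true_eq]
        refine ((pv_interval key record lo last i hk hlo0 (by omega) hwin hminim hlast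
          (by omega) (by omega)).mpr ⟨hi.1, by omega⟩)
      rw [hf1, hf2, hf3, List.nil_append, List.append_nil]

-- with distinct keys, first-match lookup of each pair's key yields that pair's value
lemma pv_getD_nodup : ∀ l : List (Int × Int), (l.map Prod.fst).Nodup →
    ∀ p ∈ l, (PySem.Dict.mk l).getD p.1 0 = p.2 := by
  intro l hnd p hp
  obtain ⟨k, v⟩ := p
  apply PySem.Dict.getD_of_mem_items
  · simpa using hp
  · simpa [PySem.Dict.keys] using hnd

-- outer: iterating dict keys + lookup = iterating the pairs
lemma pv_outer (d : PySem.Dict Int Int) :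
    ∀ l : List (Int × Int), (∀ p ∈ l, d.getD p.1 0 = p.2) →
    (l.map Prod.fst).map (fun key => pvRunsA key (d.getD key 0)) =
      l.map (fun p => pvWinningB p.1 p.2) := by
  intro l
  induction l with
  | nil => intro _; simp
  | cons p rest ih =>
    intro hd
    simp only [List.map_cons]
    rw [hd p (List.mem_cons_self ..), pv_inner,
        ih (fun q hq => hd q (List.mem_cons_of_mem _ hq))]

theorem pv_main : ∀ (parsed_inputs : List (Int × Int)),
    Pre_calculate_races parsed_inputs →
    calculate_races parsed_inputs = calculate_races_alt parsed_inputs := by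
  intro l hpre
  unfold calculate_races calculate_races_alt
  rw [PySem.List.foldl_append_singleton_eq_map, List.nil_append]
  have hkeys : (PySem.Dict.mk l).keys = l.map Prod.fst := by
    simp [PySem.Dict.keys]
  rw [hkeys]
  exact pv_outer (PySem.Dict.mk l) l (pv_getD_nodup l hpre)

-- ===== VERDICT (by name: the statement is the Claim_ definition above) =====
theorem calculate_races_spec : Claim_equal_calculate_races := by
  intro l _ hpre
  exact pv_main l hpre
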